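-- pv_equiv track=rewrite | github.com/starcrown001/test_flashmask | benchmark_magiattention.py | generate_share_question_mask
-- ===== SOURCE A (Python) =====
-- def seqlens2cu_seqlens(seqlens: list[int]) -> list[int]:
--     """transfer seqlens list to cu_seqlens, do not have check"""
--     cu_seqlens = [0]
--     for seqlen in seqlens:
--         cu_seqlens.append(cu_seqlens[-1] + seqlen)
--     return cu_seqlens
--
-- def generate_share_question_mask(doc_seq_lens=[2538, 1742, 3213]) -> tuple[list[list[int]], list[list[int]], list[bool]]:
--     """generate share question mask"""
--     seqlens = doc_seq_lens
--     seqlens_flatten = [num for sublist in seqlens for num in sublist]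
--     cu_seqlens = seqlens2cu_seqlens(seqlens_flatten)
--
--     q_ranges: list[list[int]] = []
--     k_ranges: list[list[int]] = []
--     is_causal_mapping: list[bool] = []
--     cu_seqlens_offset = 0
--     for i in range(len(seqlens)):
--         total_seqlen = sum(seqlens[i])
--         for j in range(len(seqlens[i])):
--             if j == 1:
--                 q_ranges[-1] = [cu_seqlens[cu_seqlens_offset] , cu_seqlens[cu_seqlens_offset + j + 1]]
--                 k_ranges[-1] = [cu_seqlens[cu_seqlens_offset], cu_seqlens[cu_seqlens_offset + j + 1]]
--
--                 q_ranges.append([cu_seqlens[cu_seqlens_offset + j + 1], cu_seqlens[cu_seqlens_offset] +total_seqlen])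
--                 k_ranges.append([cu_seqlens[cu_seqlens_offset], cu_seqlens[cu_seqlens_offset] + total_seqlen])
--                 is_causal_mapping.append(False)
--             else:
--                 q_ranges.append([cu_seqlens[cu_seqlens_offset + j] , cu_seqlens[cu_seqlens_offset + j + 1]])
--                 k_ranges.append([cu_seqlens[cu_seqlens_offset + j], cu_seqlens[cu_seqlens_offset + j + 1]])
--                 is_causal_mapping.append(True)
--         cu_seqlens_offset += len(seqlens[i])
--
--     return (q_ranges, k_ranges, is_causal_mapping)
-- ===== SOURCE B (Python) =====
-- def generate_share_question_mask(doc_seq_lens=[2538, 1742, 3213]) -> tuple[list[list[int]], list[list[int]], list[bool]]: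
--     """generate share question mask (per-group emission, no overwrites)"""
--     q_ranges: list[list[int]] = []
--     k_ranges: list[list[int]] = []
--     is_causal_mapping: list[bool] = []
--     base = 0
--     for docs in doc_seq_lens:
--         total = base + sum(docs)
--         if len(docs) == 1:
--             q_ranges.append([base, total])
--             k_ranges.append([base, total])
--             is_causal_mapping.append(True)
--         elif len(docs) >= 2:
--             m = base + docs[0] + docs[1]
--             q_ranges.append([base, m])
--             k_ranges.append([base, m])
--             is_causal_mapping.append(True)
--             q_ranges.append([m, total])
--             k_ranges.append([base, total])
--             is_causal_mapping.append(False)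
--             p = m
--             for d in docs[2:]:
--                 q_ranges.append([p, p + d])
--                 k_ranges.append([p, p + d])
--                 is_causal_mapping.append(True)
--                 p += d
--         base = total
--     return (q_ranges, k_ranges, is_causal_mapping)
-- ===== Notes on version B (the rewrite author's own statement) =====
-- stated objective: simpler
-- what changed: B drops the global flatten/cu_seqlens table and the j==1 overwrite of the last entry: it iterates over the groups directly, carrying a running base offset, and emits each group's ranges once from local prefix sums (1-doc group: one causal range; >=2 docs: a merged causal head range, a non-causal remainder range, then plain per-doc causal ranges).
import Mathlib
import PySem

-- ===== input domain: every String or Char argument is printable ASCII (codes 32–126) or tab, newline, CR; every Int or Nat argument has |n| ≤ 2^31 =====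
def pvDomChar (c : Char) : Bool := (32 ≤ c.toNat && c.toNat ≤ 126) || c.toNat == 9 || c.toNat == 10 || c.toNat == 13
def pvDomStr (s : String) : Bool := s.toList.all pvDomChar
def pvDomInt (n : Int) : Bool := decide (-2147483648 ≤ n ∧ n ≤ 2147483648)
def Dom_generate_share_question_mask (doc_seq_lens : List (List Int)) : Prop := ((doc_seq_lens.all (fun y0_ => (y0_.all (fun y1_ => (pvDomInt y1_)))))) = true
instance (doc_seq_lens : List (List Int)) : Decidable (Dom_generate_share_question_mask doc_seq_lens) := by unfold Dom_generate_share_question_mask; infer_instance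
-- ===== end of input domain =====

-- B emits each group's ranges directly from local prefix sums (no overwrite of the last entry);
-- objective: simpler. Return value only; neither side mutates its argument.

-- ===== PORT A =====
-- cu_seqlens[-1] is the in-range Python index into the always-nonempty accumulator: PySem.List.pyGetD is exact.
def seqlens2cu_seqlens (seqlens : List Int) : List Int :=
  seqlens.foldl (fun cu s => cu ++ [PySem.List.pyGetD cu (-1) 0 + s]) [0]

-- inner loop body of A; cu_seqlens[idx] indices are nonnegative and in range here, so List.getD is exact;
-- the Python assignment q_ranges[-1] = v on the (always nonempty here) list is dropLast ++ [v].
def stepA (cu : List Int) (off : Nat) (total_seqlen : Int)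
    (s : List (List Int) × List (List Int) × List Bool) (j : Nat) :
    List (List Int) × List (List Int) × List Bool :=
  if j == 1 then
    (s.1.dropLast ++ [[cu.getD off 0, cu.getD (off + j + 1) 0]]
        ++ [[cu.getD (off + j + 1) 0, cu.getD off 0 + total_seqlen]],
     s.2.1.dropLast ++ [[cu.getD off 0, cu.getD (off + j + 1) 0]]
        ++ [[cu.getD off 0, cu.getD off 0 + total_seqlen]],
     s.2.2 ++ [false])
  else
    (s.1 ++ [[cu.getD (off + j) 0, cu.getD (off + j + 1) 0]],
     s.2.1 ++ [[cu.getD (off + j) 0, cu.getD (off + j + 1) 0]],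
     s.2.2 ++ [true])

-- outer loop body of A (one i of 'for i in range(len(seqlens))')
def groupA (cu : List Int)
    (st : List (List Int) × List (List Int) × List Bool × Nat) (sl : List Int) :
    List (List Int) × List (List Int) × List Bool × Nat :=
  let total_seqlen := sl.sum
  let off := st.2.2.2
  let r := (List.range sl.length).foldl (stepA cu off total_seqlen) (st.1, st.2.1, st.2.2.1)
  (r.1, r.2.1, r.2.2, off + sl.length)

def generate_share_question_mask (doc_seq_lens : List (List Int)) :
    List (List Int) × List (List Int) × List Bool :=
  let seqlens := doc_seq_lens
  let seqlens_flatten := seqlens.flatMap (fun sublist => sublist)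
  let cu_seqlens := seqlens2cu_seqlens seqlens_flatten
  let st := (List.range seqlens.length).foldl
      (fun st i => groupA cu_seqlens st (seqlens.getD i [])) ([], [], [], 0)
  (st.1, st.2.1, st.2.2.1)

-- ===== PORT B =====
-- loop 'for d in docs[2:]' of Source B, carrying the running offset p
def altTail (p : Int) (ds : List Int) (q k : List (List Int)) (c : List Bool) :
    List (List Int) × List (List Int) × List Bool :=
  match ds with
  | [] => (q, k, c)
  | d :: rest => altTail (p + d) rest (q ++ [[p, p + d]]) (k ++ [[p, p + d]]) (c ++ [true])

-- per-group body of Source B's 'for docs in doc_seq_lens' loop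
def stepB (st : List (List Int) × List (List Int) × List Bool × Int) (docs : List Int) :
    List (List Int) × List (List Int) × List Bool × Int :=
  let base := st.2.2.2
  let total := base + docs.sum
  match docs with
  | [] => (st.1, st.2.1, st.2.2.1, total)
  | [_] => (st.1 ++ [[base, total]], st.2.1 ++ [[base, total]], st.2.2.1 ++ [true], total)
  | d0 :: d1 :: rest =>
    let m := base + d0 + d1
    let r := altTail m rest (st.1 ++ [[base, m], [m, total]])
        (st.2.1 ++ [[base, m], [base, total]]) (st.2.2.1 ++ [true, false])
    (r.1, r.2.1, r.2.2, total)

def generate_share_question_mask_alt (doc_seq_lens : List (List Int)) :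
    List (List Int) × List (List Int) × List Bool :=
  let st := doc_seq_lens.foldl stepB ([], [], [], (0 : Int))
  (st.1, st.2.1, st.2.2.1)

-- ===== PRECONDITION & SPEC =====
def Spec_generate_share_question_mask (doc_seq_lens : List (List Int)) (out : List (List Int) × List (List Int) × List Bool) : Prop := out = generate_share_question_mask_alt doc_seq_lens
instance (doc_seq_lens : List (List Int)) (out : List (List Int) × List (List Int) × List Bool) : Decidable (Spec_generate_share_question_mask doc_seq_lens out) := by unfold Spec_generate_share_question_mask; infer_instance

-- ===== CLAIM (what is proved, stated in full; the proofs are below) =====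
def Claim_equal_generate_share_question_mask : Prop := ∀ (doc_seq_lens : List (List Int)), Dom_generate_share_question_mask doc_seq_lens → Spec_generate_share_question_mask doc_seq_lens (generate_share_question_mask doc_seq_lens)

-- ===== LEMMAS AND PROOFS =====

-- prefix sums of xs starting (exclusively) from b
def cuFrom (b : Int) : List Int → List Int
  | [] => []
  | d :: ds => (b + d) :: cuFrom (b + d) ds

-- the entries Source B's docs[2:] loop appends
def tailE (p : Int) : List Int → List (List Int)
  | [] => []
  | d :: ds => [p, p + d] :: tailE (p + d) ds

theorem cu_foldl (xs : List Int) : ∀ (pre : List Int) (b : Int),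
    xs.foldl (fun cu s => cu ++ [PySem.List.pyGetD cu (-1) 0 + s]) (pre ++ [b])
      = pre ++ [b] ++ cuFrom b xs := by
  induction xs with
  | nil => intro pre b; simp [cuFrom]
  | cons d ds ih =>
      intro pre b
      simp only [List.foldl_cons, PySem.List.pyGetD_neg_one_append_singleton]
      have := ih (pre ++ [b]) (b + d)
      simpa [cuFrom, List.append_assoc] using this

theorem cu_eq (xs : List Int) : seqlens2cu_seqlens xs = 0 :: cuFrom 0 xs := by
  have := cu_foldl xs [] 0
  simpa [seqlens2cu_seqlens] using this

theorem cuFrom_getD (xs : List Int) : ∀ (b : Int) (i : Nat), i < xs.length →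
    (cuFrom b xs).getD i 0 = b + (xs.take (i + 1)).sum := by
  induction xs with
  | nil => intro b i h; simp at h
  | cons d ds ih =>
      intro b i h
      cases i with
      | zero => simp [cuFrom]
      | succ i =>
          have h' : i < ds.length := by simpa using h
          simp only [cuFrom, List.getD_cons_succ, List.take_succ_cons, List.sum_cons]
          rw [ih (b + d) i h']; ring

theorem cu_getD (flat : List Int) (j : Nat) (h : j ≤ flat.length) :
    (seqlens2cu_seqlens flat).getD j 0 = (flat.take j).sum := by
  rw [cu_eq]
  cases j with
  | zero => simp
  | succ i =>
      have := cuFrom_getD flat 0 i (by omega)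
      simpa using this

theorem cu_at (pre docs post : List Int) (j : Nat) (h : j ≤ docs.length) :
    (seqlens2cu_seqlens (pre ++ (docs ++ post))).getD (pre.length + j) 0
      = pre.sum + (docs.take j).sum := by
  rw [cu_getD _ _ (by simp; omega)]
  rw [List.take_append]
  have h1 : pre.length + j - pre.length = j := by omega
  have h2 : List.take (pre.length + j) pre = pre := List.take_of_length_le (by omega)
  have h3 : List.take j (docs ++ post) = List.take j docs := List.take_append_of_le_length h
  rw [h1, h2, h3]
  simp

theorem altTail_eq : ∀ (ds : List Int) (p : Int) (q k : List (List Int)) (c : List Bool),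
    altTail p ds q k c = (q ++ tailE p ds, k ++ tailE p ds, c ++ List.replicate ds.length true) := by
  intro ds
  induction ds with
  | nil => intro p q k c; simp [altTail, tailE]
  | cons d rest ih =>
      intro p q k c
      simp [altTail, tailE, ih, List.replicate_succ]

theorem innerA_tail (cu : List Int) (off : Nat) (tot : Int) :
    ∀ (js : List Nat), (∀ j ∈ js, j ≠ 1) →
    ∀ (q k : List (List Int)) (c : List Bool),
    js.foldl (stepA cu off tot) (q, k, c)
      = (q ++ js.map (fun j => [cu.getD (off + j) 0, cu.getD (off + j + 1) 0]),
         k ++ js.map (fun j => [cu.getD (off + j) 0, cu.getD (off + j + 1) 0]),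
         c ++ List.replicate js.length true) := by
  intro js
  induction js with
  | nil => intro _ q k c; simp
  | cons j js ih =>
      intro h q k c
      have hj : ¬ (j == 1) = true := by
        simpa using h j (by simp)
      simp only [List.foldl_cons, stepA, hj]
      rw [ih (fun x hx => h x (by simp [hx]))]
      simp [List.replicate_succ]

theorem tailE_map (pre docs post : List Int) :
    ∀ (ds : List Int) (i : Nat), docs.drop i = ds →
    (List.range' i ds.length).map
        (fun j => [(seqlens2cu_seqlens (pre ++ (docs ++ post))).getD (pre.length + j) 0,
                   (seqlens2cu_seqlens (pre ++ (docs ++ post))).getD (pre.length + j + 1) 0])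
      = tailE (pre.sum + (docs.take i).sum) ds := by
  intro ds
  induction ds with
  | nil => intro i _; simp [tailE]
  | cons d rest ih =>
      intro i hdrop
      have hi : i < docs.length := by
        by_contra hle
        have hnil : docs.drop i = [] := List.drop_eq_nil_of_le (by omega)
        rw [hnil] at hdrop; simp at hdrop
      have hget : docs[i]? = some d := by
        have : (docs.drop i).head? = some d := by rw [hdrop]; rfl
        simpa [List.head?_drop] using this
      have htake : (docs.take (i + 1)).sum = (docs.take i).sum + d := by
        rw [List.take_add_one, hget]; simp
      have hdrop' : docs.drop (i + 1) = rest := by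
        have : (docs.drop i).tail = rest := by rw [hdrop]; rfl
        simpa [List.tail_drop] using this
      simp only [List.length_cons]
      rw [List.range'_succ, List.map_cons]
      rw [cu_at pre docs post i (by omega)]
      have h1 : pre.length + i + 1 = pre.length + (i + 1) := by omega
      rw [h1, cu_at pre docs post (i + 1) (by omega)]
      rw [ih (i + 1) hdrop']
      simp [tailE, htake]
      refine ⟨by ring, by rw [← add_assoc]⟩

theorem group_eq (pre docs post : List Int) (q k : List (List Int)) (c : List Bool) :
    groupA (seqlens2cu_seqlens (pre ++ (docs ++ post))) (q, k, c, pre.length) docs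
      = ((stepB (q, k, c, pre.sum) docs).1,
         (stepB (q, k, c, pre.sum) docs).2.1,
         (stepB (q, k, c, pre.sum) docs).2.2.1,
         pre.length + docs.length) := by
  set cu := seqlens2cu_seqlens (pre ++ (docs ++ post)) with hcu
  match docs with
  | [] => simp [groupA, stepB]
  | [d] =>
      simp only [groupA, stepB]
      have g0 : cu[pre.length]?.getD 0 = pre.sum := by
        rw [hcu]
        simpa [List.getD_eq_getElem?_getD] using cu_at pre [d] post 0 (by simp)
      have g1 : cu[pre.length + 1]?.getD 0 = pre.sum + d := by
        rw [hcu]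
        simpa [List.getD_eq_getElem?_getD] using cu_at pre [d] post 1 (by simp)
      simp [List.range_succ, stepA, g0, g1]
  | d0 :: d1 :: rest =>
      simp only [groupA, stepB]
      have hrange : List.range (d0 :: d1 :: rest).length
          = 0 :: 1 :: List.range' 2 rest.length := by
        rw [List.range_eq_range']
        simp [List.range'_succ]
      rw [hrange]
      have g0 : cu[pre.length]?.getD 0 = pre.sum := by
        rw [hcu]
        simpa [List.getD_eq_getElem?_getD] using cu_at pre (d0 :: d1 :: rest) post 0 (by simp)
      have g1 : cu[pre.length + 1]?.getD 0 = pre.sum + d0 := by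
        rw [hcu]
        simpa [List.getD_eq_getElem?_getD] using cu_at pre (d0 :: d1 :: rest) post 1 (by simp)
      have g2 : cu[pre.length + 2]?.getD 0 = pre.sum + (d0 + d1) := by
        rw [hcu]
        simpa [List.getD_eq_getElem?_getD, add_assoc] using
          cu_at pre (d0 :: d1 :: rest) post 2 (by simp)
      have g2' : cu[pre.length + 1 + 1]?.getD 0 = pre.sum + (d0 + d1) := by
        rw [show pre.length + 1 + 1 = pre.length + 2 by omega]; exact g2
      simp only [List.foldl_cons]
      have s0 : stepA cu pre.length (d0 :: d1 :: rest).sum (q, k, c) 0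
          = (q ++ [[pre.sum, pre.sum + d0]], k ++ [[pre.sum, pre.sum + d0]], c ++ [true]) := by
        simp [stepA, g0, g1]
      rw [s0]
      have s1 : stepA cu pre.length (d0 :: d1 :: rest).sum
          (q ++ [[pre.sum, pre.sum + d0]], k ++ [[pre.sum, pre.sum + d0]], c ++ [true]) 1
          = (q ++ [[pre.sum, pre.sum + (d0 + d1)], [pre.sum + (d0 + d1), pre.sum + (d0 :: d1 :: rest).sum]],
             k ++ [[pre.sum, pre.sum + (d0 + d1)], [pre.sum, pre.sum + (d0 :: d1 :: rest).sum]],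
             c ++ [true] ++ [false]) := by
        simp [stepA, g0, g2]
      rw [s1]
      rw [innerA_tail cu pre.length (d0 :: d1 :: rest).sum (List.range' 2 rest.length)
            (by intro j hj; have := List.mem_range'_1.mp hj; omega)]
      have hmap : (List.range' 2 rest.length).map
            (fun j => [cu.getD (pre.length + j) 0, cu.getD (pre.length + j + 1) 0])
          = tailE (pre.sum + (d0 + d1)) rest := by
        have := tailE_map pre (d0 :: d1 :: rest) post rest 2 (by rfl)
        rw [hcu]
        simpa [add_assoc] using this
      rw [hmap, altTail_eq]
      simp [List.append_assoc, add_assoc]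

theorem foldl_range'_getD {α β : Type} (f : β → α → β) (d : α) (l : List α) :
    ∀ (tl : List α) (a : Nat) (init : β), l.drop a = tl →
    (List.range' a tl.length).foldl (fun s i => f s (l.getD i d)) init = tl.foldl f init := by
  intro tl
  induction tl with
  | nil => intro a init _; simp
  | cons x xs ih =>
      intro a init hdrop
      have hget : l[a]? = some x := by
        have : (l.drop a).head? = some x := by rw [hdrop]; rfl
        simpa [List.head?_drop] using this
      have hx : l.getD a d = x := by
        simp [List.getD_eq_getElem?_getD, hget]
      have hdrop' : l.drop (a + 1) = xs := by
        have : (l.drop a).tail = xs := by rw [hdrop]; rfl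
        simpa [List.tail_drop] using this
      simp only [List.length_cons]
      rw [List.range'_succ, List.foldl_cons, hx, ih (a + 1) (f init x) hdrop']
      simp

theorem foldl_range_getD {α β : Type} (f : β → α → β) (d : α) (l : List α) (init : β) :
    (List.range l.length).foldl (fun s i => f s (l.getD i d)) init = l.foldl f init := by
  rw [List.range_eq_range']
  exact foldl_range'_getD f d l l 0 init (by simp)

theorem stepB_base (st : List (List Int) × List (List Int) × List Bool × Int) (docs : List Int) :
    (stepB st docs).2.2.2 = st.2.2.2 + docs.sum := by
  match docs with
  | [] => simp [stepB]
  | [d] => simp [stepB]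
  | d0 :: d1 :: rest => simp [stepB]

theorem outer_eq : ∀ (suf pre : List (List Int)) (q k : List (List Int)) (c : List Bool),
    ((suf.foldl (groupA (seqlens2cu_seqlens ((pre ++ suf).flatMap (fun s => s))))
        (q, k, c, (pre.flatMap (fun s => s)).length)).1,
     (suf.foldl (groupA (seqlens2cu_seqlens ((pre ++ suf).flatMap (fun s => s))))
        (q, k, c, (pre.flatMap (fun s => s)).length)).2.1,
     (suf.foldl (groupA (seqlens2cu_seqlens ((pre ++ suf).flatMap (fun s => s))))
        (q, k, c, (pre.flatMap (fun s => s)).length)).2.2.1)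
      = ((suf.foldl stepB (q, k, c, (pre.flatMap (fun s => s)).sum)).1,
         (suf.foldl stepB (q, k, c, (pre.flatMap (fun s => s)).sum)).2.1,
         (suf.foldl stepB (q, k, c, (pre.flatMap (fun s => s)).sum)).2.2.1) := by
  intro suf
  induction suf with
  | nil => intro pre q k c; simp
  | cons docs suf' ih =>
      intro pre q k c
      simp only [List.foldl_cons]
      have hflat : (pre ++ docs :: suf').flatMap (fun s => s)
          = (pre.flatMap (fun s => s)) ++ (docs ++ suf'.flatMap (fun s => s)) := by
        simp
      have hg := group_eq (pre.flatMap (fun s => s)) docs (suf'.flatMap (fun s => s)) q k c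
      rw [← hflat] at hg
      rw [hg]
      have happ : pre ++ docs :: suf' = (pre ++ [docs]) ++ suf' := by simp
      have hlen : ((pre ++ [docs]).flatMap (fun s => s)).length
          = (pre.flatMap (fun s => s)).length + docs.length := by simp
      have hsum : ((pre ++ [docs]).flatMap (fun s => s)).sum
          = (pre.flatMap (fun s => s)).sum + docs.sum := by simp
      have hIH := ih (pre ++ [docs]) (stepB (q, k, c, (pre.flatMap (fun s => s)).sum) docs).1
          (stepB (q, k, c, (pre.flatMap (fun s => s)).sum) docs).2.1
          (stepB (q, k, c, (pre.flatMap (fun s => s)).sum) docs).2.2.1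
      rw [← happ, hlen, hsum] at hIH
      rw [hIH]
      have hquad : ((stepB (q, k, c, (pre.flatMap (fun s => s)).sum) docs).1,
          (stepB (q, k, c, (pre.flatMap (fun s => s)).sum) docs).2.1,
          (stepB (q, k, c, (pre.flatMap (fun s => s)).sum) docs).2.2.1,
          (pre.flatMap (fun s => s)).sum + docs.sum)
          = stepB (q, k, c, (pre.flatMap (fun s => s)).sum) docs := by
        rw [← stepB_base (q, k, c, (pre.flatMap (fun s => s)).sum) docs]
      rw [hquad]

-- ===== VERDICT (by name: the statement is the Claim_ definition above) =====
theorem generate_share_question_mask_spec : Claim_equal_generate_share_question_mask := by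
  intro doc_seq_lens _
  show _ = _
  simp only [generate_share_question_mask, generate_share_question_mask_alt]
  rw [foldl_range_getD (groupA (seqlens2cu_seqlens (doc_seq_lens.flatMap (fun sublist => sublist)))) [] doc_seq_lens]
  have := outer_eq doc_seq_lens [] [] [] []
  simpa using this
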